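-- pv_equiv track=rewrite | github.com/benoitlx/vehicle-routing-problem | Algo/Tabou_renforcement.py | cut_sol
-- ===== SOURCE A (Python) =====
-- def cut_sol(solution):
--     L = []
--     n = len(solution)
--     a= 0
--     for k in range(1,n):
--         if solution[k]==0:
--             L.append(solution[a:k] + [0])
--             a = k
--     return L
-- ===== SOURCE B (Python) =====
-- def cut_sol(solution):
--     # Stream the elements (no indexing, no slicing): keep the current segment
--     # as a growing buffer; a zero (never the first element) closes a segment,
--     # and the unfinished buffer at the end is discarded.
--     if not solution:
--         return []
--     it = iter(solution)
--     cur = [next(it)]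
--     out = []
--     for x in it:
--         if x == 0:
--             out.append(cur + [0])
--             cur = [0]
--         else:
--             cur.append(x)
--     return out
-- ===== Notes on version B (the rewrite author's own statement) =====
-- stated objective: alternative
-- what changed: B streams the elements with a current-segment buffer (no indices, no slicing): each element is appended to the buffer, a zero after the first position flushes the buffer as a finished segment, and the unfinished buffer is dropped at the end, whereas A loops over indices and re-slices the list at each zero.
import Mathlib
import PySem

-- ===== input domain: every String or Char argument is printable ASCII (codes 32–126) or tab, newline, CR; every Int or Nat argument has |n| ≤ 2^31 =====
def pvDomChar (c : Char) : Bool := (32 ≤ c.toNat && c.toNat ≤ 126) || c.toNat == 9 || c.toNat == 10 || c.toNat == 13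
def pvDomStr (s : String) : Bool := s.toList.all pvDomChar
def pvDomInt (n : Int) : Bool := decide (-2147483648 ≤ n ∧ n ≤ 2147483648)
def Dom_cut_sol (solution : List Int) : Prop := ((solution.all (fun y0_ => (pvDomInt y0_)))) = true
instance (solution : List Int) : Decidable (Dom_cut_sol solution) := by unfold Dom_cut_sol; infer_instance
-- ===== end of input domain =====

-- B streams the elements with a current-segment buffer (no indices, no slicing)
-- instead of A's index loop with re-slicing; objective: alternative, same cost.


-- ===== PORT A =====
-- literal transliteration: L = [], a = 0; for k in range(1, n): if solution[k] == 0: append solution[a:k]+[0]; a = k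
def cut_sol (solution : List Int) : List (List Int) :=
  ((PySem.List.pyRange 1 (solution.length : Int) 1).foldl
    (fun (s : List (List Int) × Int) k =>
      if PySem.List.pyGet? solution k = some 0 then
        (s.1 ++ [PySem.List.slice solution (some s.2) (some k) ++ [0]], k)
      else s)
    (([] : List (List Int)), (0 : Int))).1

-- ===== PORT B =====
-- if not solution: return []; cur = [first]; for x in rest: x == 0 → flush cur+[0], cur = [0]; else cur.append(x)
def cut_sol_alt (solution : List Int) : List (List Int) :=
  match solution with
  | [] => []
  | h :: rest =>
    (rest.foldl
      (fun (s : List (List Int) × List Int) x =>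
        if x = 0 then (s.1 ++ [s.2 ++ [0]], [0]) else (s.1, s.2 ++ [x]))
      (([] : List (List Int)), [h])).1

-- ===== PRECONDITION & SPEC =====
def Spec_cut_sol (solution : List Int) (out : List (List Int)) : Prop := out = cut_sol_alt solution
instance (solution : List Int) (out : List (List Int)) : Decidable (Spec_cut_sol solution out) := by unfold Spec_cut_sol; infer_instance

-- ===== CLAIM (what is proved, stated in full; the proofs are below) =====
def Claim_equal_cut_sol : Prop := ∀ (solution : List Int), Dom_cut_sol solution → Spec_cut_sol solution (cut_sol solution)

-- ===== LEMMAS AND PROOFS =====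

-- A's loop step
def pvStepA (sol : List Int) (s : List (List Int) × Int) (k : Int) : List (List Int) × Int :=
  if PySem.List.pyGet? sol k = some 0 then
    (s.1 ++ [PySem.List.slice sol (some s.2) (some k) ++ [0]], k)
  else s

-- B's loop step
def pvStepB (s : List (List Int) × List Int) (x : Int) : List (List Int) × List Int :=
  if x = 0 then (s.1 ++ [s.2 ++ [0]], [0]) else (s.1, s.2 ++ [x])

lemma pvSlice_nat (sol : List Int) (a b : Nat) :
    PySem.List.slice sol (some (a : Int)) (some (b : Int)) = (sol.drop a).take (b - a) :=
  PySem.List.slice_natCast sol a b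

lemma pvSlice_snoc (sol : List Int) (a j : Nat) (ha : a ≤ j) (hj : j < sol.length) :
    PySem.List.slice sol (some (a : Int)) (some ((j + 1 : Nat) : Int)) =
      PySem.List.slice sol (some (a : Int)) (some (j : Int)) ++ [sol[j]] := by
  rw [pvSlice_nat, pvSlice_nat]
  have h1 : j + 1 - a = (j - a) + 1 := by omega
  rw [h1, List.take_succ]
  congr 1
  have h2 : a + (j - a) = j := by omega
  have h3 : j - a < (sol.drop a).length := by simp; omega
  simp [List.getElem?_drop, h2, List.getElem?_eq_getElem (by omega : j < sol.length)]

-- invariant: A's remaining fold over indices j..n-1 with last cut a equals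
-- B's remaining fold over the dropped suffix with buffer sol[a:j]
lemma pvInv (sol : List Int) :
    ∀ (d j a : Nat), j + d = sol.length → 1 ≤ j → a ≤ j →
    ∀ (L : List (List Int)),
      ((PySem.List.pyRange (j : Int) (sol.length : Int) 1).foldl (pvStepA sol) (L, (a : Int))).1 =
      ((sol.drop j).foldl pvStepB (L, PySem.List.slice sol (some (a : Int)) (some (j : Int)))).1 := by
  intro d
  induction d with
  | zero =>
      intro j a hj _ _ L
      have : j = sol.length := by omega
      subst this
      simp [PySem.List.pyRange]
  | succ d ih =>
      intro j a hjd hj ha L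
      have hjn : j < sol.length := by omega
      have hrange : PySem.List.pyRange (j : Int) (sol.length : Int) 1 =
          (j : Int) :: PySem.List.pyRange ((j : Int) + 1) (sol.length : Int) 1 :=
        PySem.List.pyRange_one_cons (by exact_mod_cast hjn)
      have hdrop : sol.drop j = sol[j] :: sol.drop (j + 1) :=
        (List.drop_eq_getElem_cons hjn)
      have hget : PySem.List.pyGet? sol (j : Int) = some sol[j] := by
        simp [List.getElem?_eq_getElem hjn]
      have hcast : ((j : Int) + 1) = ((j + 1 : Nat) : Int) := by push_cast; ring
      rw [hrange, hdrop, List.foldl_cons, List.foldl_cons]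
      by_cases hz : sol[j] = (0 : Int)
      · have hA : pvStepA sol (L, (a : Int)) (j : Int) =
            (L ++ [PySem.List.slice sol (some (a : Int)) (some (j : Int)) ++ [0]], (j : Int)) := by
          simp [pvStepA, hget, hz]
        have hB : pvStepB (L, PySem.List.slice sol (some (a : Int)) (some (j : Int))) sol[j] =
            (L ++ [PySem.List.slice sol (some (a : Int)) (some (j : Int)) ++ [0]], [0]) := by
          simp [pvStepB, hz]
        rw [hA, hB, hcast]
        have hseg : PySem.List.slice sol (some ((j : Nat) : Int)) (some ((j + 1 : Nat) : Int)) = [(0 : Int)] := by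
          rw [pvSlice_snoc sol j j le_rfl hjn, pvSlice_nat, hz]; simp
        have := ih (j + 1) j (by omega) (by omega) (by omega)
          (L ++ [PySem.List.slice sol (some (a : Int)) (some (j : Int)) ++ [0]])
        rw [hseg] at this
        exact this
      · have hA : pvStepA sol (L, (a : Int)) (j : Int) = (L, (a : Int)) := by
          simp [pvStepA, hget, hz]
        have hB : pvStepB (L, PySem.List.slice sol (some (a : Int)) (some (j : Int))) sol[j] =
            (L, PySem.List.slice sol (some (a : Int)) (some (j : Int)) ++ [sol[j]]) := by
          simp [pvStepB, hz]
        rw [hA, hB, hcast]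
        have := ih (j + 1) a (by omega) (by omega) (by omega) L
        rw [pvSlice_snoc sol a j ha hjn] at this
        exact this

lemma cut_sol_eq_alt (sol : List Int) : cut_sol sol = cut_sol_alt sol := by
  cases sol with
  | nil => rfl
  | cons h rest =>
      have hlen : (1 : Nat) + rest.length = (h :: rest).length := by simp; omega
      have := pvInv (h :: rest) rest.length 1 0 (by simpa using hlen.symm ▸ rfl) le_rfl (by omega) []
      have hslice : PySem.List.slice (h :: rest) (some ((0 : Nat) : Int)) (some ((1 : Nat) : Int)) = [h] := by
        rw [pvSlice_nat]; simp
      rw [hslice] at this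
      have hgoal : cut_sol (h :: rest) =
          ((PySem.List.pyRange ((1 : Nat) : Int) (((h :: rest).length : Nat) : Int) 1).foldl
            (pvStepA (h :: rest)) ([], ((0 : Nat) : Int))).1 := by
        rfl
      rw [hgoal, this]
      rfl

-- ===== VERDICT (by name: the statement is the Claim_ definition above) =====
theorem cut_sol_spec : Claim_equal_cut_sol := by
  intro solution _
  exact cut_sol_eq_alt solution
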